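-- pv_equiv track=rewrite | github.com/0xM1cx/HACK4GOV3-PREP | Challanges/Misc/NotSolved/SimpleProgramming_ctfLearn/code.py | checkLines
-- ===== SOURCE A (Python) =====
-- def checkLines(line):
--
--     numOfZero = 0
--     numOfOne = 0
--
--     for digit in line:
--         if digit == "0":
--             numOfZero += 1
--
--         if digit == "1":
--             numOfOne += 1
--
--     if numOfZero % 3 == 0 or numOfOne % 2 == 0:
--         return True
--     else:
--         return False
-- ===== SOURCE B (Python) =====
-- def checkLines(line):
--     # divide and conquer: residues (zeros mod 3, ones mod 2) of halves combine additively
--     def residues(s):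
--         if len(s) <= 1:
--             z = 1 if s == "0" else 0
--             o = 1 if s == "1" else 0
--             return z % 3, o % 2
--         mid = len(s) // 2
--         z1, o1 = residues(s[:mid])
--         z2, o2 = residues(s[mid:])
--         return (z1 + z2) % 3, (o1 + o2) % 2
--     z, o = residues(line)
--     return z == 0 or o == 0
-- ===== Notes on version B (the rewrite author's own statement) =====
-- stated objective: alternative
-- what changed: Replaces A's single fused counting loop with a divide-and-conquer recursion that splits the string in halves and combines only the residues (zeros mod 3, ones mod 2), never materialising the full counts.
import Mathlib
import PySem

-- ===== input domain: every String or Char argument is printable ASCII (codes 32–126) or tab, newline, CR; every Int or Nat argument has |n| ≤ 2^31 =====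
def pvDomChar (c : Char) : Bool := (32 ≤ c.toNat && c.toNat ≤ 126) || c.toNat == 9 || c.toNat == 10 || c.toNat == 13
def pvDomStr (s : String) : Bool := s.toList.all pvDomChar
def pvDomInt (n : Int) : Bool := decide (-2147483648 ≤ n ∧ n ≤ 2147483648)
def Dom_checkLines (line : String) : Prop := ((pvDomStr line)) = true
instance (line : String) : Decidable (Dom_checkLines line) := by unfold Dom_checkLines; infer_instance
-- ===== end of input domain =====

-- B replaces A's single fused counting loop (two unbounded accumulators) with a
-- divide-and-conquer recursion combining only residues mod 3 / mod 2 (objective: alternative).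

-- ===== PORT A =====
-- one pass, two accumulators, two independent ifs; then the or-test with explicit True/False
def checkLines (line : String) : Bool :=
  let p := line.toList.foldl
    (fun (acc : Int × Int) d =>
      let numOfZero := if d == '0' then acc.1 + 1 else acc.1
      let numOfOne := if d == '1' then acc.2 + 1 else acc.2
      (numOfZero, numOfOne))
    (0, 0)
  if PySem.Int.mod p.1 3 == 0 || PySem.Int.mod p.2 2 == 0 then true else false

-- ===== PORT B =====
-- Source B's residues: split at len//2, recurse, combine residues additively
def residuesB (l : List Char) : Int × Int :=
  if _h : l.length ≤ 1 then
    ((if l = ['0'] then 1 else 0) % 3, (if l = ['1'] then 1 else 0) % 2)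
  else
    let mid := l.length / 2
    let p1 := residuesB (l.take mid)
    let p2 := residuesB (l.drop mid)
    (PySem.Int.mod (p1.1 + p2.1) 3, PySem.Int.mod (p1.2 + p2.2) 2)
termination_by l.length
decreasing_by
  · simp only [List.length_take]; omega
  · simp only [List.length_drop]; omega

def checkLines_alt (line : String) : Bool :=
  let p := residuesB line.toList
  p.1 == 0 || p.2 == 0

-- ===== PRECONDITION & SPEC =====
def Spec_checkLines (line : String) (out : Bool) : Prop := out = checkLines_alt line
instance (line : String) (out : Bool) : Decidable (Spec_checkLines line out) := by unfold Spec_checkLines; infer_instance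

-- ===== CLAIM (what is proved, stated in full; the proofs are below) =====
def Claim_equal_checkLines : Prop := ∀ (line : String), Dom_checkLines line → Spec_checkLines line (checkLines line)

-- ===== LEMMAS AND PROOFS =====

-- B's recursion computes exactly the two count residues
theorem residuesB_eq (l : List Char) :
    residuesB l = ((l.count '0' : Int) % 3, (l.count '1' : Int) % 2) := by
  induction l using residuesB.induct with
  | case1 l h =>
    rw [residuesB]
    simp only [h, dite_true]
    interval_cases hl : l.length
    · rw [List.length_eq_zero_iff.mp hl]; decide
    · obtain ⟨c, rfl⟩ : ∃ c, l = [c] := by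
        match l, hl with | [c], _ => exact ⟨c, rfl⟩
      by_cases h0 : c = '0' <;> by_cases h1 : c = '1' <;>
        simp_all [List.count_nil]
  | case2 l h mid ih1 ih2 =>
    rw [residuesB]
    simp only [h, dite_false]
    rw [ih1, ih2]
    simp only [PySem.Int.mod, Int.fmod_eq_emod]
    have h0 : (l.take mid).count '0' + (l.drop mid).count '0'
        = l.count '0' := by rw [← List.count_append, List.take_append_drop]
    have h1 : (l.take mid).count '1' + (l.drop mid).count '1'
        = l.count '1' := by rw [← List.count_append, List.take_append_drop]
    have e0 := congrArg (Int.ofNat) h0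
    have e1 := congrArg (Int.ofNat) h1
    push_cast at e0 e1
    refine Prod.ext ?_ ?_ <;> simp only [] <;> omega

-- A's fold computes exactly the two character counts
theorem foldA (l : List Char) : ∀ (z o : Int),
    l.foldl (fun (acc : Int × Int) d =>
      let numOfZero := if d == '0' then acc.1 + 1 else acc.1
      let numOfOne := if d == '1' then acc.2 + 1 else acc.2
      (numOfZero, numOfOne)) (z, o)
    = (z + l.count '0', o + l.count '1') := by
  induction l with
  | nil => intro z o; simp
  | cons h t ih =>
    intro z o
    simp only [List.foldl_cons, List.count_cons, ih]
    by_cases h0 : h = '0' <;> by_cases h1 : h = '1' <;>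
      simp_all <;> omega

-- ===== VERDICT (by name: the statement is the Claim_ definition above) =====
theorem checkLines_spec : Claim_equal_checkLines := by
  intro line _
  unfold Spec_checkLines checkLines checkLines_alt
  simp only [foldA, residuesB_eq, zero_add, PySem.Int.mod, Int.fmod_eq_emod]
  norm_num
  have d3 : ∀ a : Int, decide ((3:Int) ∣ a) = (a % 3 == 0) := by
    intro a; by_cases h : (3:Int) ∣ a <;> simp [h] <;> omega
  have d2 : ∀ a : Int, decide ((2:Int) ∣ a) = (a % 2 == 0) := by
    intro a; by_cases h : (2:Int) ∣ a <;> simp [h] <;> omega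
  rw [d3, d2]
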